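-- pv_equiv track=rewrite | github.com/pypi-data/pypi-mirror-2 | packages/tl.rename/tl.rename-0.1.2.tar.gz/tl.rename-0.1.2/tl/rename/case.py | sentence_case
-- ===== SOURCE A (Python) =====
-- def is_roman(word):
--     return set(word.upper()).issubset("IVXLCDM")
--
-- def sentence_case(name):
--     new_name = ""
--     first_word = True
--     word = ""
--     dots = 0
--
--     def transform_word():
--         if is_roman(word):
--             return word.upper()
--         if first_word:
--             return word.capitalize()
--         return word.lower()
--
--     for c in name:
--         if c.isalnum():
--             word += c
--         else:
--             if word:
--                 new_name += transform_word()
--                 first_word = False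
--                 word = ""
--             new_name += c
--         if c == ".":
--             dots += 1
--             first_word = (dots == 1)
--         else:
--             dots = 0
--         if c == "'":
--             first_word = False
--     new_name += transform_word()
--
--     return new_name
-- ===== SOURCE B (Python) =====
-- def is_roman(word):
--     return set(word.upper()).issubset("IVXLCDM")
--
--
-- def sentence_case(name):
--     # Tokenize into maximal runs of alnum (words) / non-alnum (separators),
--     # then emit run by run, tracking the sentence-start flag per separator run.
--     runs = []
--     i = 0
--     n = len(name)
--     while i < n:
--         flag = name[i].isalnum()
--         j = i
--         while j < n and name[j].isalnum() == flag:
--             j += 1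
--         runs.append((flag, name[i:j]))
--         i = j
--     out = []
--     first = True
--     for is_word, text in runs:
--         if is_word:
--             if is_roman(text):
--                 out.append(text.upper())
--             elif first:
--                 out.append(text.capitalize())
--             else:
--                 out.append(text.lower())
--             first = False
--         else:
--             out.append(text)
--             dots = 0
--             for ch in text:
--                 if ch == ".":
--                     dots += 1
--                     first = (dots == 1)
--                 else:
--                     dots = 0
--                     if ch == "'":
--                         first = False
--     return "".join(out)
-- ===== Notes on version B (the rewrite author's own statement) =====
-- stated objective: faster
-- what changed: Replaced A's single char-by-char state machine (word buffer, first_word flag, dot counter, and quadratic 'new_name += ...' string growth) with a tokenizer splitting the name into maximal alnum/non-alnum runs and a run-level loop that transforms each word run, recomputes the sentence-start flag from each separator run, and joins the pieces once.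
import Mathlib
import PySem

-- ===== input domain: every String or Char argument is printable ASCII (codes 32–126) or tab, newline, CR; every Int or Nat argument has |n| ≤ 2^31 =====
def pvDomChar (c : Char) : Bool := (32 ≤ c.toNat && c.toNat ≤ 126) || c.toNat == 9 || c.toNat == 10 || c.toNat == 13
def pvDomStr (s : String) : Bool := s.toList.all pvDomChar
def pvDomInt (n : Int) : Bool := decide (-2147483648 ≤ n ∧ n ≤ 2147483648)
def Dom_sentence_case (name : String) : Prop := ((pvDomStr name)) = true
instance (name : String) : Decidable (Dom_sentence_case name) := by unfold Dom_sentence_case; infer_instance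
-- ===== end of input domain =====

-- B re-implements A's char-by-char state machine as a run tokenizer (maximal alnum /
-- non-alnum runs) processed run by run with a single join, avoiding A's repeated
-- string concatenation (measured faster in a timing run); same values.

-- ===== PORT A =====
-- is_roman(word) = set(word.upper()).issubset("IVXLCDM")
def pvIsRoman (word : List Char) : Bool :=
  PySem.Set.issubset (PySem.Set.ofList (PySem.Chars.upper word)) "IVXLCDM".toList

-- word.capitalize(): first char to upper, rest to lower (exact on ASCII: titlecase = upper there)
def pvCapitalize (word : List Char) : List Char :=
  match word with
  | [] => []
  | c :: rest => PySem.Chars.upperChar c :: PySem.Chars.lower rest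

-- the closure transform_word(), reading (word, first_word)
def pvTransform (word : List Char) (first : Bool) : List Char :=
  if pvIsRoman word then PySem.Chars.upper word
  else if first then pvCapitalize word
  else PySem.Chars.lower word

-- one iteration of A's `for c in name` loop over state (new_name, first_word, word, dots)
def pvAStep (st : List Char × Bool × List Char × Int) (c : Char) : List Char × Bool × List Char × Int :=
  let (nn, first, word, dots) := st
  let (nn, first, word) :=
    if PySem.Chars.isalnum c then (nn, first, word ++ [c])
    else if word ≠ [] then (nn ++ pvTransform word first ++ [c], false, ([] : List Char))
    else (nn ++ [c], first, word)
  let (first, dots) :=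
    if c = '.' then ((dots + 1 == 1), dots + 1)
    else (first, 0)
  let first := if c = '\'' then false else first
  (nn, first, word, dots)

def sentence_case (name : String) : String :=
  let st := name.toList.foldl pvAStep ([], true, [], (0 : Int))
  String.ofList (st.1 ++ pvTransform st.2.2.1 st.2.1)

-- ===== PORT B =====
-- inner `while j < n and name[j].isalnum() == flag` : take the maximal run with that class
def pvTakeRun (flag : Bool) : List Char → List Char × List Char
  | [] => ([], [])
  | c :: rest =>
    if PySem.Chars.isalnum c = flag then
      let p := pvTakeRun flag rest
      (c :: p.1, p.2)
    else ([], c :: rest)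

theorem pvTakeRun_snd_length (flag : Bool) (l : List Char) : (pvTakeRun flag l).2.length ≤ l.length := by
  induction l with
  | nil => simp [pvTakeRun]
  | cons c rest ih =>
    simp only [pvTakeRun]
    split
    · simpa using Nat.le_succ_of_le ih
    · simp

-- outer `while i < n` tokenizer loop
def pvRuns : List Char → List (Bool × List Char)
  | [] => []
  | c :: rest =>
    let flag := PySem.Chars.isalnum c
    let p := pvTakeRun flag rest
    (flag, c :: p.1) :: pvRuns p.2
termination_by l => l.length
decreasing_by
  simpa using Nat.lt_succ_of_le (pvTakeRun_snd_length _ _)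

-- the separator-run `for ch in text` loop updating (dots, first)
def pvSepStep (st : Int × Bool) (ch : Char) : Int × Bool :=
  if ch = '.' then (st.1 + 1, (st.1 + 1 == 1))
  else (0, if ch = '\'' then false else st.2)

def pvSepFlag (first : Bool) (text : List Char) : Bool :=
  (text.foldl pvSepStep ((0 : Int), first)).2

-- the `for is_word, text in runs` loop over state (out, first)
def pvBStep (st : List (List Char) × Bool) (r : Bool × List Char) : List (List Char) × Bool :=
  if r.1 then (st.1 ++ [pvTransform r.2 st.2], false)
  else (st.1 ++ [r.2], pvSepFlag st.2 r.2)

def sentence_case_alt (name : String) : String :=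
  let st := (pvRuns name.toList).foldl pvBStep ([], true)
  String.ofList st.1.flatten

-- ===== PRECONDITION & SPEC =====
def Spec_sentence_case (name : String) (out : String) : Prop := out = sentence_case_alt name
instance (name : String) (out : String) : Decidable (Spec_sentence_case name out) := by unfold Spec_sentence_case; infer_instance

-- ===== CLAIM (what is proved, stated in full; the proofs are below) =====
def Claim_equal_sentence_case : Prop := ∀ (name : String), Dom_sentence_case name → Spec_sentence_case name (sentence_case name)

-- ===== LEMMAS AND PROOFS =====

-- A's final value from a loop state
def pvFinishA (st : List Char × Bool × List Char × Int) : List Char :=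
  st.1 ++ pvTransform st.2.2.1 st.2.1

-- B's emitted output for a run list and an incoming flag
def pvBOut (runs : List (Bool × List Char)) (f : Bool) : List Char :=
  ((runs.foldl pvBStep ([], f)).1).flatten

theorem pvTransform_nil (f : Bool) : pvTransform [] f = [] := by
  cases f <;> rfl

theorem pvAlnum_ne (c : Char) (h : PySem.Chars.isalnum c = true) : c ≠ '.' ∧ c ≠ '\'' := by
  constructor <;> rintro rfl <;> exact absurd h (by decide)

theorem pvStepA_alnum (c : Char) (h : PySem.Chars.isalnum c = true)
    (nn : List Char) (f : Bool) (w : List Char) (d : Int) :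
    pvAStep (nn, f, w, d) c = (nn, f, w ++ [c], 0) := by
  obtain ⟨h1, h2⟩ := pvAlnum_ne c h
  simp [pvAStep, h, h1, h2]

theorem pvStepA_sep_empty (c : Char) (h : PySem.Chars.isalnum c = false)
    (nn : List Char) (f : Bool) (d : Int) :
    pvAStep (nn, f, [], d) c
      = (nn ++ [c], (pvSepStep (d, f) c).2, [], (pvSepStep (d, f) c).1) := by
  by_cases hdot : c = '.'
  · subst hdot; simp [pvAStep, pvSepStep, h]
  · by_cases hap : c = '\''
    · subst hap; simp [pvAStep, pvSepStep, h]
    · simp [pvAStep, pvSepStep, h, hdot, hap]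

theorem pvStepA_sep_flush (c : Char) (h : PySem.Chars.isalnum c = false)
    (nn : List Char) (f : Bool) (w : List Char) (hw : w ≠ []) :
    pvAStep (nn, f, w, 0) c
      = (nn ++ pvTransform w f ++ [c], (pvSepStep (0, false) c).2, [], (pvSepStep (0, false) c).1) := by
  by_cases hdot : c = '.'
  · subst hdot; simp [pvAStep, pvSepStep, h, hw]
  · by_cases hap : c = '\''
    · subst hap; simp [pvAStep, pvSepStep, h, hw]
    · simp [pvAStep, pvSepStep, h, hw, hdot, hap]

-- word run: alnum chars only accumulate into the word and reset dots
theorem pvFoldA_word (ws : List Char) (h : ∀ c ∈ ws, PySem.Chars.isalnum c = true) :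
    ∀ (nn : List Char) (f : Bool) (w : List Char) (d : Int),
    ws.foldl pvAStep (nn, f, w, d) = (nn, f, w ++ ws, if ws.isEmpty then d else 0) := by
  induction ws with
  | nil => intro nn f w d; simp
  | cons c rest ih =>
    intro nn f w d
    have hc := h c (by simp)
    simp only [List.foldl_cons, pvStepA_alnum c hc]
    rw [ih (fun x hx => h x (by simp [hx]))]
    cases rest <;> simp

-- separator run with empty word buffer: chars pass through, (dots, first) evolve by pvSepStep
theorem pvFoldA_sep (ss : List Char) (h : ∀ c ∈ ss, PySem.Chars.isalnum c = false) :
    ∀ (nn : List Char) (f : Bool) (d : Int),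
    ss.foldl pvAStep (nn, f, [], d)
      = (nn ++ ss, (ss.foldl pvSepStep (d, f)).2, [], (ss.foldl pvSepStep (d, f)).1) := by
  induction ss with
  | nil => intro nn f d; simp
  | cons c rest ih =>
    intro nn f d
    have hc := h c (by simp)
    simp only [List.foldl_cons, pvStepA_sep_empty c hc]
    rw [ih (fun x hx => h x (by simp [hx]))]
    simp

-- pvTakeRun facts
theorem pvTakeRun_mem (flag : Bool) (l : List Char) :
    ∀ c ∈ (pvTakeRun flag l).1, PySem.Chars.isalnum c = flag := by
  induction l with
  | nil => simp [pvTakeRun]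
  | cons c rest ih =>
    simp only [pvTakeRun]
    split
    · rename_i hc
      intro x hx
      rcases List.mem_cons.mp hx with rfl | hx
      · exact hc
      · exact ih x hx
    · simp

theorem pvTakeRun_append (flag : Bool) (l : List Char) :
    (pvTakeRun flag l).1 ++ (pvTakeRun flag l).2 = l := by
  induction l with
  | nil => simp [pvTakeRun]
  | cons c rest ih =>
    simp only [pvTakeRun]
    split
    · simpa using ih
    · simp

theorem pvTakeRun_head (flag : Bool) (l : List Char) (c : Char) (rest : List Char)
    (h : (pvTakeRun flag l).2 = c :: rest) : PySem.Chars.isalnum c ≠ flag := by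
  induction l with
  | nil => simp [pvTakeRun] at h
  | cons x xs ih =>
    simp only [pvTakeRun] at h
    split at h
    · exact ih h
    · rename_i hx
      obtain rfl : x = c := by injection h
      exact hx

-- B's fold appends to its accumulator
theorem pvFoldB_acc (runs : List (Bool × List Char)) :
    ∀ (acc : List (List Char)) (f : Bool),
    (runs.foldl pvBStep (acc, f)).1 = acc ++ (runs.foldl pvBStep ([], f)).1 := by
  induction runs with
  | nil => simp
  | cons r rest ih =>
    intro acc f
    simp only [List.foldl_cons, pvBStep]
    by_cases hr : r.1 = true
    · simp only [hr, if_true, List.nil_append]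
      rw [ih, ih [pvTransform r.2 f]]
      simp
    · simp only [Bool.not_eq_true] at hr
      simp only [hr, Bool.false_eq_true, if_false, List.nil_append]
      rw [ih, ih [r.2]]
      simp

theorem pvBOut_word (w : List Char) (rest : List (Bool × List Char)) (f : Bool) :
    pvBOut ((true, w) :: rest) f = pvTransform w f ++ pvBOut rest false := by
  simp only [pvBOut, List.foldl_cons, pvBStep, if_true, List.nil_append]
  rw [pvFoldB_acc]
  simp

theorem pvBOut_sep (s : List Char) (rest : List (Bool × List Char)) (f : Bool) :
    pvBOut ((false, s) :: rest) f = s ++ pvBOut rest (pvSepFlag f s) := by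
  simp only [pvBOut, List.foldl_cons, pvBStep, Bool.false_eq_true, if_false, List.nil_append]
  rw [pvFoldB_acc]
  simp

-- main induction (fuel = length bound); the dots counter is 0 whenever the
-- remaining suffix starts with a separator (it was just reset by an alnum char)
theorem pvMain : ∀ (n : Nat) (l : List Char), l.length ≤ n →
    ∀ (nn : List Char) (f : Bool) (d : Int),
    (d = 0 ∨ l = [] ∨ ∃ c t, l = c :: t ∧ PySem.Chars.isalnum c = true) →
    pvFinishA (l.foldl pvAStep (nn, f, [], d)) = nn ++ pvBOut (pvRuns l) f := by
  intro n
  induction n with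
  | zero =>
    intro l hl nn f d _
    have : l = [] := List.length_eq_zero_iff.mp (Nat.le_zero.mp hl)
    subst this
    simp [pvFinishA, pvTransform_nil, pvBOut, pvRuns]
  | succ n ih =>
    intro l hl nn f d hd
    cases l with
    | nil => simp [pvFinishA, pvTransform_nil, pvBOut, pvRuns]
    | cons c rest =>
      have hrest : rest.length ≤ n := by simpa using hl
      by_cases hflag : PySem.Chars.isalnum c = true
      · -- word run
        have hsplit := pvTakeRun_append true rest
        have hmem := pvTakeRun_mem true rest
        set r1 := (pvTakeRun true rest).1 with hr1
        set r2 := (pvTakeRun true rest).2 with hr2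
        have hlen2 : r2.length ≤ rest.length := by
          rw [← hsplit]; simp
        conv_rhs => rw [pvRuns]
        simp only [hflag, ← hr1, ← hr2]
        rw [pvBOut_word]
        have hfold1 : (c :: rest).foldl pvAStep (nn, f, [], d)
            = r2.foldl pvAStep (nn, f, c :: r1, 0) := by
          rw [show c :: rest = (c :: r1) ++ r2 by rw [← hsplit]; rfl]
          rw [List.foldl_append]
          rw [show (c :: r1).foldl pvAStep (nn, f, [], d) = (nn, f, [] ++ (c :: r1), if (c :: r1).isEmpty then d else 0) from
            pvFoldA_word (c :: r1) (by
              intro x hx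
              rcases List.mem_cons.mp hx with rfl | hx
              · exact hflag
              · exact hmem x hx) nn f [] d]
          simp
        rw [hfold1]
        cases hr2e : r2 with
        | nil =>
          simp [pvFinishA, pvBOut, pvRuns]
        | cons c2 rest2 =>
          have hc2 : PySem.Chars.isalnum c2 = false := by
            have := pvTakeRun_head true rest c2 rest2 (by rw [← hr2, hr2e])
            simpa using this
          have hsplit2 := pvTakeRun_append false rest2
          have hmem2 := pvTakeRun_mem false rest2
          set s1 := (pvTakeRun false rest2).1 with hs1
          set s2 := (pvTakeRun false rest2).2 with hs2
          have hlen3 : s2.length ≤ n := by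
            have h1 : s2.length ≤ rest2.length := by rw [← hsplit2]; simp
            have h2 : rest2.length < r2.length := by rw [hr2e]; simp
            omega
          conv_rhs => rw [pvRuns]
          simp only [hc2, ← hs1, ← hs2]
          rw [pvBOut_sep]
          rw [List.foldl_cons]
          rw [pvStepA_sep_flush c2 hc2 nn f (c :: r1) (by simp)]
          rw [show rest2 = s1 ++ s2 from hsplit2.symm, List.foldl_append]
          rw [pvFoldA_sep s1 hmem2]
          have hG : s1.foldl pvSepStep ((pvSepStep (0, false) c2).1, (pvSepStep (0, false) c2).2)
              = (c2 :: s1).foldl pvSepStep (0, false) := by simp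
          rw [hG]
          have hd2 : (((c2 :: s1).foldl pvSepStep (0, false)).1 = 0 ∨ s2 = [] ∨
              ∃ x t, s2 = x :: t ∧ PySem.Chars.isalnum x = true) := by
            cases hs2e : s2 with
            | nil => right; left; rfl
            | cons x t =>
              right; right
              refine ⟨x, t, rfl, ?_⟩
              have := pvTakeRun_head false rest2 x t (by rw [← hs2, hs2e])
              simpa using this
          rw [ih s2 hlen3 _ _ _ hd2]
          simp [pvSepFlag]
      · -- separator run
        have hflag' : PySem.Chars.isalnum c = false := by simpa using hflag
        have hd0 : d = 0 := by
          rcases hd with h | h | ⟨x, t, hxt, hx⟩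
          · exact h
          · simp at h
          · obtain rfl : c = x := by injection hxt
            rw [hx] at hflag'; simp at hflag'
        subst hd0
        have hsplit := pvTakeRun_append false rest
        have hmem := pvTakeRun_mem false rest
        set r1 := (pvTakeRun false rest).1 with hr1
        set r2 := (pvTakeRun false rest).2 with hr2
        have hlen2 : r2.length ≤ n := by
          have : r2.length ≤ rest.length := by rw [← hsplit]; simp
          omega
        conv_rhs => rw [pvRuns]
        simp only [hflag', ← hr1, ← hr2]
        rw [pvBOut_sep]
        rw [show c :: rest = (c :: r1) ++ r2 by rw [← hsplit]; rfl]
        rw [List.foldl_append]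
        rw [pvFoldA_sep (c :: r1) (by
          intro x hx
          rcases List.mem_cons.mp hx with rfl | hx
          · exact hflag'
          · exact hmem x hx)]
        have hd2 : (((c :: r1).foldl pvSepStep (0, f)).1 = 0 ∨ r2 = [] ∨
            ∃ x t, r2 = x :: t ∧ PySem.Chars.isalnum x = true) := by
          cases hr2e : r2 with
          | nil => right; left; rfl
          | cons x t =>
            right; right
            refine ⟨x, t, rfl, ?_⟩
            have := pvTakeRun_head false rest x t (by rw [← hr2, hr2e])
            simpa using this
        rw [ih r2 hlen2 _ _ _ hd2]
        simp [pvSepFlag]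

-- ===== VERDICT (by name: the statement is the Claim_ definition above) =====
theorem sentence_case_spec : Claim_equal_sentence_case := by
  intro name _
  unfold Spec_sentence_case sentence_case sentence_case_alt
  have h := pvMain name.toList.length name.toList le_rfl [] true 0 (Or.inl rfl)
  simp only [pvFinishA, pvBOut] at h
  simp only []
  rw [show ((name.toList.foldl pvAStep ([], true, [], (0:Int))).1
      ++ pvTransform (name.toList.foldl pvAStep ([], true, [], (0:Int))).2.2.1
        (name.toList.foldl pvAStep ([], true, [], (0:Int))).2.1)
    = ((pvRuns name.toList).foldl pvBStep ([], true)).1.flatten from h]
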